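-- pv_equiv track=rewrite | github.com/yewonniy/algorithm | 프로그래머스/주식 가격.py | solution
-- ===== SOURCE A (Python) =====
-- def solution(prices):
--     answer = [0] * len(prices)
--     stack = []
--     for i in range(len(prices)):
--         while len(stack) != 0 and stack[-1][1] > prices[i]:
--             p_idx, p_price = stack.pop()
--             answer[p_idx] = i-p_idx
--         stack.append([i, prices[i]])
--     for i in range(len(stack)):
--         answer[stack[i][0]] = len(prices) - stack[i][0] -1
--     return answer
-- ===== SOURCE B (Python) =====
-- def solution(prices):
--     n = len(prices)
--     answer = [0] * n
--     for j in range(n):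
--         c = 0
--         for k in range(j + 1, n):
--             c += 1
--             if prices[k] < prices[j]:
--                 break
--         answer[j] = c
--     return answer
-- ===== Notes on version B (the rewrite author's own statement) =====
-- stated objective: simpler
-- what changed: Replaced the monotonic stack with mutable answer array and end-of-loop flush by a direct quadratic scan: for each index, count forward until the first strictly smaller price.
import Mathlib
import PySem

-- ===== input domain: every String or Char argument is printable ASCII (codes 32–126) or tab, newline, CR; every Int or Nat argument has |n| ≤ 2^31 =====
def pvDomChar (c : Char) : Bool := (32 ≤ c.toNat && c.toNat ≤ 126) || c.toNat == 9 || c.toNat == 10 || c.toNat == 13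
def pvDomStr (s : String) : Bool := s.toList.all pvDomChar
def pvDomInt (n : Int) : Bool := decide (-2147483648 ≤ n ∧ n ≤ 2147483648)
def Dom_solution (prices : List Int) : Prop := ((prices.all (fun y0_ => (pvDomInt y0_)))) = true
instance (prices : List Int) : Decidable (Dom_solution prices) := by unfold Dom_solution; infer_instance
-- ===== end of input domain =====

-- B replaces A's monotonic stack (with its final flush loop) by a direct quadratic
-- forward scan per index; same return value, simpler code (objective: simpler).

-- ===== PORT A =====
-- Python's while-loop popping the stack (top of stack = head of list; loop indices
-- are always in range, so prices[i] is ported as getD i 0).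
def popLoop (ans : List Int) (stack : List (Nat × Int)) (i : Nat) (pi : Int) :
    List Int × List (Nat × Int) :=
  match stack with
  | [] => (ans, [])
  | q :: rest =>
      if q.2 > pi then popLoop (ans.set q.1 ((i : Int) - (q.1 : Int))) rest i pi
      else (ans, q :: rest)

-- body of A's first for-loop
def stepA (prices : List Int) (st : List Int × List (Nat × Int)) (i : Nat) :
    List Int × List (Nat × Int) :=
  let r := popLoop st.1 st.2 i (prices.getD i 0)
  (r.1, (i, prices.getD i 0) :: r.2)

def solution (prices : List Int) : List Int :=
  let n := prices.length
  let r := (List.range n).foldl (stepA prices) (List.replicate n 0, [])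
  r.2.foldl (fun ans q => ans.set q.1 ((n : Int) - (q.1 : Int) - 1)) r.1

-- ===== PORT B =====
-- B's inner loop: walk the suffix, counting one step per element, stopping at the
-- first element strictly smaller than p.
def cnt (p : Int) : List Int → Int
  | [] => 0
  | x :: xs => if x < p then 1 else 1 + cnt p xs

def solution_alt (prices : List Int) : List Int :=
  (List.range prices.length).map (fun j => cnt (prices.getD j 0) (prices.drop (j + 1)))

-- ===== PRECONDITION & SPEC =====
def Spec_solution (prices : List Int) (out : List Int) : Prop := out = solution_alt prices
instance (prices : List Int) (out : List Int) : Decidable (Spec_solution prices out) := by unfold Spec_solution; infer_instance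

-- ===== CLAIM (what is proved, stated in full; the proofs are below) =====
def Claim_equal_solution : Prop := ∀ (prices : List Int), Dom_solution prices → Spec_solution prices (solution prices)

-- ===== LEMMAS AND PROOFS =====

-- abbreviation: price at index j
def pAt (prices : List Int) (j : Nat) : Int := prices.getD j 0

-- invariant of A's main loop after processing indices 0..i-1
def InvA (prices : List Int) (i : Nat) (st : List Int × List (Nat × Int)) : Prop :=
  st.1.length = prices.length ∧
  (∀ q ∈ st.2, q.1 < i ∧ q.2 = pAt prices q.1) ∧
  List.Pairwise (fun a b => b.1 < a.1 ∧ b.2 ≤ a.2) st.2 ∧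
  (∀ q ∈ st.2, ∀ k, q.1 < k → k < i → ¬ pAt prices k < pAt prices q.1) ∧
  (∀ j, j < i → (∀ q ∈ st.2, q.1 ≠ j) →
    st.1.getD j 0 = cnt (pAt prices j) (prices.drop (j + 1)))

lemma getD_set_self (l : List Int) (n : Nat) (a : Int) (h : n < l.length) :
    (l.set n a).getD n 0 = a := by
  rw [List.getD_eq_getElem _ _ (by simpa using h)]
  simp

lemma getD_set_ne (l : List Int) (n j : Nat) (a : Int) (h : n ≠ j) :
    (l.set n a).getD j 0 = l.getD j 0 := by
  simp [List.getD, List.getElem?_set_ne h]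

lemma getD_drop (prices : List Int) (j m : Nat) (h : j + 1 + m < prices.length) :
    (prices.drop (j + 1)).getD m 0 = prices.getD (j + 1 + m) 0 := by
  rw [List.getD_eq_getElem _ _ (by simp; omega), List.getD_eq_getElem _ _ h]
  simp

lemma cnt_eq_len (p : Int) (s : List Int)
    (h : ∀ k, k < s.length → ¬ s.getD k 0 < p) : cnt p s = (s.length : Int) := by
  induction s with
  | nil => simp [cnt]
  | cons x xs ih =>
    have h0 : ¬ x < p := by simpa using h 0 (by simp)
    have hih := ih (fun k hk => by simpa using h (k + 1) (by simpa using hk))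
    simp [cnt, h0, hih]
    ring

lemma cnt_eq (p : Int) (s : List Int) (m : Nat) (hm : m < s.length)
    (hall : ∀ k, k < m → ¬ s.getD k 0 < p) (hlt : s.getD m 0 < p) :
    cnt p s = (m : Int) + 1 := by
  induction s generalizing m with
  | nil => simp at hm
  | cons x xs ih =>
    cases m with
    | zero =>
      simp at hlt
      simp [cnt, hlt]
    | succ m' =>
      have h0 : ¬ x < p := by simpa using hall 0 (by omega)
      have hih := ih m' (by simpa using hm)
        (fun k hk => by simpa using hall (k + 1) (by omega))
        (by simpa using hlt)
      simp [cnt, h0, hih]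
      ring

-- pop case: the popped index j gets value i - j, which is B's count for j
lemma cnt_pop (prices : List Int) (j i : Nat) (hj : j < i) (hi : i < prices.length)
    (h4 : ∀ k, j < k → k < i → ¬ pAt prices k < pAt prices j)
    (hlt : pAt prices i < pAt prices j) :
    cnt (pAt prices j) (prices.drop (j + 1)) = (i : Int) - (j : Int) := by
  have hm : i - j - 1 < (prices.drop (j + 1)).length := by simp; omega
  have h := cnt_eq (pAt prices j) (prices.drop (j + 1)) (i - j - 1) hm
    (fun k hk => by
      rw [getD_drop prices j k (by omega)]
      exact h4 (j + 1 + k) (by omega) (by omega))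
    (by
      rw [getD_drop prices j (i - j - 1) (by omega)]
      have he : j + 1 + (i - j - 1) = i := by omega
      rw [he]; exact hlt)
  rw [h]
  have : ((i - j - 1 : Nat) : Int) = (i : Int) - (j : Int) - 1 := by omega
  omega

-- flush case: an index surviving on the stack gets n - j - 1
lemma cnt_flush (prices : List Int) (j : Nat) (hj : j < prices.length)
    (h4 : ∀ k, j < k → k < prices.length → ¬ pAt prices k < pAt prices j) :
    cnt (pAt prices j) (prices.drop (j + 1)) = (prices.length : Int) - (j : Int) - 1 := by
  have h := cnt_eq_len (pAt prices j) (prices.drop (j + 1))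
    (fun k hk => by
      have hk' : j + 1 + k < prices.length := by simp at hk; omega
      rw [getD_drop prices j k hk']
      exact h4 (j + 1 + k) (by omega) (by omega))
  rw [h]
  simp
  omega

lemma popLoop_inv (prices : List Int) (i : Nat) (hi : i < prices.length) :
    ∀ stack ans, InvA prices i (ans, stack) →
    ((popLoop ans stack i (pAt prices i)).1.length = prices.length ∧
     (∀ q ∈ (popLoop ans stack i (pAt prices i)).2, q.1 < i ∧ q.2 = pAt prices q.1) ∧
     List.Pairwise (fun a b => b.1 < a.1 ∧ b.2 ≤ a.2) (popLoop ans stack i (pAt prices i)).2 ∧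
     (∀ q ∈ (popLoop ans stack i (pAt prices i)).2, ∀ k, q.1 < k → k < i →
        ¬ pAt prices k < pAt prices q.1) ∧
     (∀ q ∈ (popLoop ans stack i (pAt prices i)).2, q.2 ≤ pAt prices i) ∧
     (∀ j, j < i → (∀ q ∈ (popLoop ans stack i (pAt prices i)).2, q.1 ≠ j) →
        (popLoop ans stack i (pAt prices i)).1.getD j 0 =
          cnt (pAt prices j) (prices.drop (j + 1)))) := by
  intro stack
  induction stack with
  | nil =>
    intro ans h
    obtain ⟨h1, h2, h3, h4, h5⟩ := h
    simp only [popLoop]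
    refine ⟨h1, by simp, by simp, by simp, by simp, ?_⟩
    exact fun j hj _ => h5 j hj (by simp)
  | cons q rest ih =>
    intro ans h
    obtain ⟨h1, h2, h3, h4, h5⟩ := h
    have hrest : ∀ r ∈ rest, r.1 < q.1 ∧ r.2 ≤ q.2 :=
      fun r hr => (List.pairwise_cons.mp h3).1 r hr
    by_cases hc : q.2 > pAt prices i
    · -- pop q, recurse on rest
      have hq := h2 q (by simp)
      have h1' : ans.length = prices.length := h1
      have hqlen : q.1 < ans.length := by omega
      have hinv' : InvA prices i (ans.set q.1 ((i : Int) - (q.1 : Int)), rest) := by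
        refine ⟨by simpa using h1, fun r hr => h2 r (by simp [hr]),
          (List.pairwise_cons.mp h3).2, fun r hr => h4 r (by simp [hr]), ?_⟩
        intro j hj hq'
        by_cases hjq : j = q.1
        · rw [hjq, getD_set_self _ _ _ hqlen]
          have hp := cnt_pop prices q.1 i hq.1 hi
            (fun k hk1 hk2 => h4 q (by simp) k hk1 hk2) (by rw [← hq.2]; exact hc)
          omega
        · rw [getD_set_ne _ _ _ _ (fun he => hjq he.symm)]
          exact h5 j hj (by
            intro r hr
            rcases List.mem_cons.mp hr with h' | h'
            · subst h'; exact fun he => hjq he.symm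
            · exact hq' r h')
      have hres := ih (ans.set q.1 ((i : Int) - (q.1 : Int))) hinv'
      simpa only [popLoop, if_pos hc] using hres
    · -- stop: stack unchanged
      have hle : q.2 ≤ pAt prices i := by omega
      simp only [popLoop, if_neg hc]
      refine ⟨h1, h2, h3, h4, ?_, fun j hj hq' => h5 j hj hq'⟩
      intro r hr
      rcases List.mem_cons.mp hr with h' | h'
      · subst h'; exact hle
      · exact le_trans (hrest r h').2 hle

-- the main loop establishes the invariant
lemma fold_inv (prices : List Int) :
    ∀ i, i ≤ prices.length →
    InvA prices i ((List.range i).foldl (stepA prices)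
      (List.replicate prices.length 0, [])) := by
  intro i
  induction i with
  | zero =>
    intro _
    refine ⟨by simp, by simp, by simp, by simp, by omega⟩
  | succ i ih =>
    intro hle
    have hi : i < prices.length := by omega
    have hIH := ih (by omega)
    rw [List.range_succ, List.foldl_append, List.foldl_cons, List.foldl_nil]
    set st := (List.range i).foldl (stepA prices) (List.replicate prices.length 0, [])
      with hst
    have hinv : InvA prices i (st.1, st.2) := hIH
    have hp := popLoop_inv prices i hi st.2 st.1 hinv
    obtain ⟨p1, p2, p3, p4, p5, p6⟩ := hp
    show InvA prices (i + 1)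
      ((popLoop st.1 st.2 i (prices.getD i 0)).1,
       (i, prices.getD i 0) :: (popLoop st.1 st.2 i (prices.getD i 0)).2)
    have hpa : prices.getD i 0 = pAt prices i := rfl
    rw [hpa]
    refine ⟨p1, ?_, ?_, ?_, ?_⟩
    · intro r hr
      rcases List.mem_cons.mp hr with h' | h'
      · subst h'; exact ⟨by omega, rfl⟩
      · exact ⟨by have := (p2 r h').1; omega, (p2 r h').2⟩
    · exact List.pairwise_cons.mpr ⟨fun r hr => ⟨(p2 r hr).1, p5 r hr⟩, p3⟩
    · intro r hr k hk1 hk2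
      rcases List.mem_cons.mp hr with h' | h'
      · subst h'; omega
      · by_cases hki : k = i
        · subst hki
          have h2' := (p2 r h').2
          have h5' := p5 r h'
          rw [← h2']
          omega
        · exact p4 r h' k hk1 (by omega)
    · intro j hj hq'
      have hji : j ≠ i := fun he => hq' (i, pAt prices i) (by simp) (by simp [he])
      exact p6 j (by omega) (fun r hr => hq' r (by simp [hr]))

-- the flush foldl, pointwise
lemma flush_len (n : Nat) :
    ∀ (st : List (Nat × Int)) (ans : List Int),
    (st.foldl (fun a q => a.set q.1 ((n : Int) - (q.1 : Int) - 1)) ans).length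
      = ans.length := by
  intro st
  induction st with
  | nil => intro ans; rfl
  | cons q rest ih => intro ans; rw [List.foldl_cons, ih]; simp

lemma flush_getD (n : Nat) :
    ∀ (st : List (Nat × Int)) (ans : List Int), (∀ q ∈ st, q.1 < ans.length) →
    ∀ j, j < ans.length →
    (st.foldl (fun a q => a.set q.1 ((n : Int) - (q.1 : Int) - 1)) ans).getD j 0
      = if ∃ q ∈ st, q.1 = j then (n : Int) - (j : Int) - 1 else ans.getD j 0 := by
  intro st
  induction st with
  | nil => intro ans _ j _; simp
  | cons q rest ih =>
    intro ans hlen j hj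
    rw [List.foldl_cons]
    have hr := ih (ans.set q.1 ((n : Int) - (q.1 : Int) - 1))
      (fun r hr => by simpa using hlen r (by simp [hr])) j (by simpa using hj)
    rw [hr]
    by_cases hmem : ∃ r ∈ rest, r.1 = j
    · simp [hmem]
    · by_cases hqj : q.1 = j
      · rw [if_neg hmem,
          if_pos (show ∃ r ∈ q :: rest, r.1 = j from ⟨q, by simp, hqj⟩), ← hqj,
          getD_set_self ans q.1 _ (hlen q (by simp))]
      · rw [if_neg hmem,
          if_neg (show ¬ ∃ r ∈ q :: rest, r.1 = j by
            rintro ⟨r, hr, he⟩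
            rcases List.mem_cons.mp hr with h' | h'
            · exact hqj (h' ▸ he)
            · exact hmem ⟨r, h', he⟩),
          getD_set_ne ans q.1 j _ hqj]

-- ===== VERDICT (by name: the statement is the Claim_ definition above) =====
theorem solution_spec : Claim_equal_solution := by
  intro prices _
  show solution prices = solution_alt prices
  have hinv := fold_inv prices prices.length (le_refl _)
  set st := (List.range prices.length).foldl (stepA prices)
    (List.replicate prices.length 0, []) with hst
  obtain ⟨h1, h2, h3, h4, h5⟩ := hinv
  have hlen2 : ∀ q ∈ st.2, q.1 < st.1.length := fun q hq => by
    have := (h2 q hq).1; omega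
  apply List.ext_getElem
  · show (st.2.foldl _ st.1).length = _
    rw [flush_len, h1]
    simp [solution_alt]
  · intro j hja hjb
    have hjn : j < prices.length := by
      simpa [solution_alt] using hjb
    have hflush := flush_getD prices.length st.2 st.1 hlen2 j (by omega)
    have hga : (st.2.foldl (fun a q => a.set q.1 ((prices.length : Int) - (q.1 : Int) - 1)) st.1)[j] =
        (st.2.foldl (fun a q => a.set q.1 ((prices.length : Int) - (q.1 : Int) - 1)) st.1).getD j 0 :=
      (List.getD_eq_getElem _ _ _).symm
    show (st.2.foldl _ st.1)[j] = (solution_alt prices)[j]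
    rw [hga, hflush]
    have hb : (solution_alt prices)[j] = cnt (pAt prices j) (prices.drop (j + 1)) := by
      simp [solution_alt, pAt]
    rw [hb]
    by_cases hmem : ∃ q ∈ st.2, q.1 = j
    · obtain ⟨q, hq, hqj⟩ := hmem
      have hcf := cnt_flush prices j hjn (by
        intro k hk1 hk2
        have h := h4 q hq k (by omega) hk2
        rwa [hqj] at h)
      rw [if_pos ⟨q, hq, hqj⟩]
      omega
    · simp only [if_neg hmem]
      exact h5 j hjn (fun q hq he => hmem ⟨q, hq, he⟩)
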